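-- pv_equiv track=rewrite | github.com/fredporter/uDOS-vibe | core/services/ok_router.py | _pick_risk
-- ===== SOURCE A (Python) =====
-- from typing import List, Dict, Optional
--
-- def _pick_risk(commands: List[str]) -> str:
--     destructive = {"DESTROY", "WIPE", "RESET"}
--     medium = {"RUN", "REBUILD", "STOP"}
--     for cmd in commands:
--         upper = cmd.upper()
--         if any(token in upper for token in destructive):
--             return "high"
--     for cmd in commands:
--         upper = cmd.upper()
--         if any(token in upper for token in medium):
--             return "medium"
--     return "low"
-- ===== SOURCE B (Python) =====
-- def _pick_risk(commands):
--     destructive = ("DESTROY", "WIPE", "RESET")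
--     medium = ("RUN", "REBUILD", "STOP")
--     saw_medium = False
--     for cmd in commands:
--         upper = cmd.upper()
--         if any(token in upper for token in destructive):
--             return "high"
--         if not saw_medium and any(token in upper for token in medium):
--             saw_medium = True
--     return "medium" if saw_medium else "low"
-- ===== Notes on version B (the rewrite author's own statement) =====
-- stated objective: alternative
-- what changed: Replaced A's two full scans by a single scan that returns 'high' immediately and tracks a saw_medium flag, deciding medium/low after the loop.
import Mathlib
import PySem

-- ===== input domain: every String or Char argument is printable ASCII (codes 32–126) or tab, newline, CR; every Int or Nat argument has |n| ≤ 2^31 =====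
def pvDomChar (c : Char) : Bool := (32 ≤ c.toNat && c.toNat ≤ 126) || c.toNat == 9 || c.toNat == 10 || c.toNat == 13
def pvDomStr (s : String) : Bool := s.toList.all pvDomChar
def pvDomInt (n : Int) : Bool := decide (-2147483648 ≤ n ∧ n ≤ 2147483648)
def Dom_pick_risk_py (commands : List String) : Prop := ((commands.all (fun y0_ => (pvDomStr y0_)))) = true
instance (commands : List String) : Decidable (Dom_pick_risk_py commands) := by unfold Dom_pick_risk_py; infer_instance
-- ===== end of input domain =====

-- B merges A's two scans into one early-exit pass with a saw_medium flag (alternative decomposition, same cost).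

-- ===== PORT A =====
-- first loop of A: return "high" on the first command containing a destructive token
def pickRiskLoop1 (destructive : PySem.Set String) : List String → Option String
  | [] => none
  | cmd :: rest =>
    let upper := PySem.Str.upper cmd
    if destructive.any (fun token => PySem.Str.isIn token upper) then some "high"
    else pickRiskLoop1 destructive rest

-- second loop of A: return "medium" on the first command containing a medium token
def pickRiskLoop2 (medium : PySem.Set String) : List String → Option String
  | [] => none
  | cmd :: rest =>
    let upper := PySem.Str.upper cmd
    if medium.any (fun token => PySem.Str.isIn token upper) then some "medium"
    else pickRiskLoop2 medium rest

def pick_risk_py (commands : List String) : String :=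
  let destructive := PySem.Set.ofList ["DESTROY", "WIPE", "RESET"]
  let medium := PySem.Set.ofList ["RUN", "REBUILD", "STOP"]
  match pickRiskLoop1 destructive commands with
  | some r => r
  | none =>
    match pickRiskLoop2 medium commands with
    | some r => r
    | none => "low"

-- ===== PORT B =====
-- single pass with a saw_medium flag
def pickRiskAltLoop (destructive medium : List String) : Bool → List String → String
  | saw, [] => if saw then "medium" else "low"
  | saw, cmd :: rest =>
    let upper := PySem.Str.upper cmd
    if destructive.any (fun token => PySem.Str.isIn token upper) then "high"
    else if !saw && medium.any (fun token => PySem.Str.isIn token upper) then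
      pickRiskAltLoop destructive medium true rest
    else pickRiskAltLoop destructive medium saw rest

def pick_risk_py_alt (commands : List String) : String :=
  pickRiskAltLoop ["DESTROY", "WIPE", "RESET"] ["RUN", "REBUILD", "STOP"] false commands

-- ===== PRECONDITION & SPEC =====
def Spec_pick_risk_py (commands : List String) (out : String) : Prop := out = pick_risk_py_alt commands
instance (commands : List String) (out : String) : Decidable (Spec_pick_risk_py commands out) := by unfold Spec_pick_risk_py; infer_instance

-- ===== CLAIM (what is proved, stated in full; the proofs are below) =====
def Claim_equal_pick_risk_py : Prop := ∀ (commands : List String), Dom_pick_risk_py commands → Spec_pick_risk_py commands (pick_risk_py commands)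

-- ===== LEMMAS AND PROOFS =====

theorem pickRiskAltLoop_eq (T M : List String) (cmds : List String) (saw : Bool) :
    pickRiskAltLoop T M saw cmds =
      match pickRiskLoop1 T cmds with
      | some r => r
      | none =>
        if saw then "medium"
        else
          match pickRiskLoop2 M cmds with
          | some r => r
          | none => "low" := by
  induction cmds generalizing saw with
  | nil => cases saw <;> simp [pickRiskAltLoop, pickRiskLoop1, pickRiskLoop2]
  | cons cmd rest ih =>
    cases h1 : (T.any fun token => PySem.Str.isIn token (PySem.Str.upper cmd)) <;>
      cases h2 : (M.any fun token => PySem.Str.isIn token (PySem.Str.upper cmd)) <;>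
      cases saw <;>
      simp only [pickRiskAltLoop, pickRiskLoop1, pickRiskLoop2, h1, h2, ih,
        Bool.not_false, Bool.not_true, Bool.true_and, Bool.false_and,
        Bool.false_eq_true, if_true, if_false, ite_self] <;>
      cases hL : pickRiskLoop1 T rest <;> simp

-- ===== VERDICT (by name: the statement is the Claim_ definition above) =====
theorem pick_risk_py_spec : Claim_equal_pick_risk_py := by
  intro commands _
  unfold Spec_pick_risk_py pick_risk_py pick_risk_py_alt
  rw [pickRiskAltLoop_eq]
  simp [PySem.Set.ofList, PySem.Set.add, PySem.Set.contains]
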